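-- pv_equiv track=rewrite | github.com/AnDangQuoc/my-thesis | utils/dataset.py | get_mask_file
-- ===== SOURCE A (Python) =====
-- def get_mask_file(fileName):
--     tmp = fileName.split('_')
--     tmp[-1] = '004.npy'
--
--     result = ''
--
--     for i in range(len(tmp)):
--         result = result + tmp[i]
--         if i < (len(tmp)-1):
--             result = result + '_'
--     return result
-- ===== SOURCE B (Python) =====
-- def get_mask_file(fileName):
--     head, sep, _tail = fileName.rpartition('_')
--     return head + sep + '004.npy'
-- ===== Notes on version B (the rewrite author's own statement) =====
-- stated objective: simpler
-- what changed: Replaces split-into-all-segments plus an index-driven rejoin loop with a single rpartition at the last underscore and one concatenation.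
import Mathlib
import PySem

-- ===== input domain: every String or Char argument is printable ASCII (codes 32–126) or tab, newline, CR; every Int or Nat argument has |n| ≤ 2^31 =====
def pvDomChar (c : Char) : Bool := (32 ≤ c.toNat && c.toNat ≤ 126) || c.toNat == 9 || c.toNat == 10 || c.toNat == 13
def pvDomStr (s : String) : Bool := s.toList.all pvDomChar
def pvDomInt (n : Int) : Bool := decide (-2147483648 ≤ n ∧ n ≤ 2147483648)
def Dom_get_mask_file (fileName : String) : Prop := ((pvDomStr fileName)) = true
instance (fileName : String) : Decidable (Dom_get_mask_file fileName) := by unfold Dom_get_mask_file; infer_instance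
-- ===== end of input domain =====

-- B replaces A's split-into-all-segments plus index-driven rejoin loop by a single
-- rpartition at the last underscore and one concatenation; return values are proved equal.

-- ===== PORT A =====
def get_mask_file (fileName : String) : String :=
  -- tmp = fileName.split('_')
  let tmp := PySem.Chars.splitOn fileName.toList ['_']
  -- tmp[-1] = '004.npy'  (split always yields a nonempty list, so -1 is its last slot)
  let tmp2 := tmp.dropLast ++ ["004.npy".toList]
  -- result = ''; for i in range(len(tmp)): result += tmp[i]; if i < len(tmp)-1: result += '_'
  let result := (PySem.List.pyRange 0 (PySem.List.len tmp2)).foldl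
      (fun r i =>
        let r2 := r ++ PySem.List.pyGetD tmp2 i []
        if i < PySem.List.len tmp2 - 1 then r2 ++ ['_'] else r2) []
  String.ofList result

-- ===== PORT B =====
-- Hand port of fileName.rpartition('_') restricted to what B uses: 'head + sep' of the
-- rpartition, i.e. the prefix of the string up to and including the LAST '_' (none when
-- there is no '_', where rpartition returns ('', '', fileName) and head+sep = '').
-- Exact for this single-character separator: structural recursion keeping the prefix of
-- the last occurrence found in the remainder.
def pyRPartHead : List Char → Option (List Char)
  | [] => none
  | c :: rest =>
    match pyRPartHead rest with
    | some p => some (c :: p)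
    | none => if c = '_' then some [c] else none

def get_mask_file_alt (fileName : String) : String :=
  -- head, sep, _tail = fileName.rpartition('_'); return head + sep + '004.npy'
  String.ofList (((pyRPartHead fileName.toList).getD []) ++ "004.npy".toList)

-- ===== PRECONDITION & SPEC =====
def Spec_get_mask_file (fileName : String) (out : String) : Prop := out = get_mask_file_alt fileName
instance (fileName : String) (out : String) : Decidable (Spec_get_mask_file fileName out) := by unfold Spec_get_mask_file; infer_instance

-- ===== CLAIM (what is proved, stated in full; the proofs are below) =====
def Claim_equal_get_mask_file : Prop := ∀ (fileName : String), Dom_get_mask_file fileName → Spec_get_mask_file fileName (get_mask_file fileName)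

-- ===== LEMMAS AND PROOFS =====

-- Reference form of split('_'): structural recursion on the characters.
def mySplit : List Char → List (List Char)
  | [] => [[]]
  | c :: rest => if c = '_' then [] :: mySplit rest else (mySplit rest).modifyHead (c :: ·)

theorem mySplit_ne_nil (cs : List Char) : mySplit cs ≠ [] := by
  induction cs with
  | nil => simp [mySplit]
  | cons c rest ih =>
    simp only [mySplit]
    split
    · simp
    · cases h : mySplit rest with
      | nil => exact absurd h ih
      | cons a t => simp

theorem modifyHead_id {α : Type} (l : List α) : List.modifyHead (fun x : α => x) l = l := by
  cases l <;> rfl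

theorem splitOn_go_eq (fuel : Nat) (l cur : List Char) (acc : List (List Char))
    (h : l.length ≤ fuel) :
    PySem.Chars.splitOn.go ['_'] fuel l cur acc
      = acc.reverse ++ (mySplit l).modifyHead (cur.reverse ++ ·) := by
  induction fuel generalizing l cur acc with
  | zero =>
    have : l = [] := List.length_eq_zero_iff.mp (Nat.le_zero.mp h)
    subst this
    simp [PySem.Chars.splitOn.go, mySplit]
  | succ f ih =>
    cases l with
    | nil => simp [PySem.Chars.splitOn.go, mySplit]
    | cons c rest =>
      simp only [PySem.Chars.splitOn.go]
      by_cases hc : c = '_'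
      · subst hc
        rw [if_pos (by simp [List.isPrefixOf])]
        rw [ih _ _ _ (by simpa using Nat.le_of_succ_le_succ h)]
        simp [mySplit, modifyHead_id]
      · rw [if_neg (by simp [List.isPrefixOf]; exact fun h => absurd h.symm hc)]
        rw [ih _ _ _ (by simpa using Nat.le_of_succ_le_succ h)]
        simp only [mySplit, if_neg hc, List.modifyHead_modifyHead]
        congr 1
        cases hm : mySplit rest with
        | nil => exact absurd hm (mySplit_ne_nil rest)
        | cons a t => simp [Function.comp]

theorem splitOn_eq_mySplit (cs : List Char) :
    PySem.Chars.splitOn cs ['_'] = mySplit cs := by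
  rw [PySem.Chars.splitOn, splitOn_go_eq _ _ _ _ (Nat.le_succ _)]
  cases h : mySplit cs with
  | nil => exact absurd h (mySplit_ne_nil cs)
  | cons a t => simp

theorem intercalate_cons_cons (a b : List Char) (t : List (List Char)) :
    ['_'].intercalate (a :: b :: t) = a ++ '_' :: ['_'].intercalate (b :: t) := by
  simp [List.intercalate, List.intersperse]

theorem intercalate_append_singleton (x : List Char) :
    ∀ (l : List (List Char)), l ≠ [] →
      ['_'].intercalate (l ++ [x]) = ['_'].intercalate l ++ '_' :: x := by
  intro l
  induction l with
  | nil => intro h; exact absurd rfl h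
  | cons a t ih =>
    intro _
    cases t with
    | nil => simp [List.intercalate]
    | cons b u =>
      have h2 := ih (by simp)
      simp only [List.cons_append] at h2 ⊢
      rw [intercalate_cons_cons a b (u ++ [x]), h2, intercalate_cons_cons a b u]
      simp

theorem intercalate_cons_prepend (c : Char) (x : List Char) (t : List (List Char)) (ht : t ≠ []) :
    ['_'].intercalate ((c :: x) :: t) = c :: ['_'].intercalate (x :: t) := by
  cases t with
  | nil => exact absurd rfl ht
  | cons y v =>
    rw [intercalate_cons_cons, intercalate_cons_cons]
    simp

-- The index loop of A is an intercalation with '_'.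
theorem loop_eq_intercalate (tmp : List (List Char)) :
    (PySem.List.pyRange 0 (PySem.List.len tmp)).foldl
      (fun r i =>
        let r2 := r ++ PySem.List.pyGetD tmp i []
        if i < PySem.List.len tmp - 1 then r2 ++ ['_'] else r2) []
      = List.intercalate ['_'] tmp := by
  suffices h : ∀ k : Nat, k ≤ tmp.length →
      (PySem.List.pyRange 0 (k : Int)).foldl
        (fun r i =>
          let r2 := r ++ PySem.List.pyGetD tmp i []
          if i < PySem.List.len tmp - 1 then r2 ++ ['_'] else r2) []
        = List.intercalate ['_'] (tmp.take k)
          ++ (if k < tmp.length ∧ 0 < k then ['_'] else []) by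
    have := h tmp.length le_rfl
    simpa [PySem.List.len] using this
  intro k hk
  induction k with
  | zero => simp [PySem.List.pyRange, List.intercalate]
  | succ k ih =>
    have hklt : k < tmp.length := hk
    have h1 : ((k + 1 : Nat) : Int) = (k : Int) + 1 := by push_cast; ring
    rw [h1, PySem.List.pyRange_one_append 0 k (k + 1) (by positivity) (by omega),
        List.foldl_append, ih (by omega),
        PySem.List.pyRange_one_cons (by omega)]
    have hemp : PySem.List.pyRange ((k : Int) + 1) ((k : Int) + 1) = [] := by
      simp [PySem.List.pyRange]
    rw [hemp]
    have hget : PySem.List.pyGetD tmp (k : Int) [] = tmp[k] := by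
      rw [PySem.List.pyGetD_natCast]
      simp [hklt]
    simp only [List.foldl_cons, List.foldl_nil, hget, PySem.List.len]
    rw [List.take_succ_eq_append_getElem hklt]
    have hmid : ['_'].intercalate (tmp.take k ++ [tmp[k]])
        = ['_'].intercalate (tmp.take k) ++ (if 0 < k then ['_'] else []) ++ tmp[k] := by
      rcases Nat.eq_zero_or_pos k with h0 | h0
      · subst h0
        simp [List.intercalate]
      · rw [if_pos h0,
            intercalate_append_singleton _ _ (by
              intro h
              rcases List.take_eq_nil_iff.mp h with h' | h'
              · omega
              · subst h'; simp at hklt)]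
        simp
    have hif : (if k < tmp.length ∧ 0 < k then ['_'] else ([] : List Char))
        = (if 0 < k then ['_'] else []) := by
      simp [hklt]
    rw [hif, hmid]
    by_cases hlast : k + 1 < tmp.length
    · rw [if_pos (show (k : Int) < (tmp.length : Int) - 1 by omega),
          if_pos (show k + 1 < tmp.length ∧ 0 < k + 1 from ⟨hlast, Nat.succ_pos k⟩)]
    · rw [if_neg (show ¬ (k : Int) < (tmp.length : Int) - 1 by omega),
          if_neg (show ¬ (k + 1 < tmp.length ∧ 0 < k + 1) by omega)]
      simp [List.append_assoc]

theorem rpart_none_iff (cs : List Char) :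
    pyRPartHead cs = none ↔ (mySplit cs).length = 1 := by
  induction cs with
  | nil => simp [pyRPartHead, mySplit]
  | cons c rest ih =>
    by_cases hc : c = '_'
    · subst hc
      simp only [pyRPartHead, mySplit]
      constructor
      · intro h; exfalso; cases hp : pyRPartHead rest <;> simp [hp] at h
      · intro h; exfalso; simp at h; exact mySplit_ne_nil rest h
    · simp only [pyRPartHead, mySplit, if_neg hc]
      cases hp : pyRPartHead rest with
      | none =>
        simp only [hp, true_iff] at ih
        simp [List.length_modifyHead, ih]
      | some p =>
        have hne : (mySplit rest).length ≠ 1 := by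
          intro h; rw [← ih] at h; rw [hp] at h; exact Option.some_ne_none _ h
        simp [List.length_modifyHead, hne]

-- Core: A's "replace last piece then rejoin" equals B's "prefix through last '_' plus mask".
theorem key (cs : List Char) (mask : List Char) :
    List.intercalate ['_'] ((mySplit cs).dropLast ++ [mask])
      = ((pyRPartHead cs).getD []) ++ mask := by
  induction cs with
  | nil => simp [mySplit, pyRPartHead, List.intercalate]
  | cons c rest ih =>
    by_cases hc : c = '_'
    · subst hc
      have hm : mySplit rest ≠ [] := mySplit_ne_nil rest
      have hms : mySplit ('_' :: rest) = [] :: mySplit rest := by simp [mySplit]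
      have hrp : pyRPartHead ('_' :: rest) = some ('_' :: (pyRPartHead rest).getD []) := by
        simp only [pyRPartHead]
        cases hp : pyRPartHead rest <;> simp
      rw [hms, hrp]
      rw [List.dropLast_cons_of_ne_nil (by simp [hm])]
      cases hd : (mySplit rest).dropLast ++ [mask] with
      | nil => simp at hd
      | cons a t =>
        have hstep : List.intercalate ['_'] ([] :: a :: t)
            = '_' :: List.intercalate ['_'] (a :: t) := by
          simpa using intercalate_cons_cons [] a t
        rw [List.cons_append, hd, hstep, ← hd, ih]
        simp
    · simp only [mySplit, if_neg hc, pyRPartHead]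
      cases hp : pyRPartHead rest with
      | none =>
        have h1 : (mySplit rest).length = 1 := (rpart_none_iff rest).mp hp
        obtain ⟨a, ha⟩ := List.length_eq_one_iff.mp h1
        rw [ha]
        simp [List.intercalate]
      | some p =>
        cases hms : mySplit rest with
        | nil => exact absurd hms (mySplit_ne_nil rest)
        | cons a t =>
          cases t with
          | nil =>
            have h1 : pyRPartHead rest = none := (rpart_none_iff rest).mpr (by simp [hms])
            rw [hp] at h1
            simp at h1
          | cons b u =>
            rw [hms] at ih
            have hdl : (a :: b :: u).dropLast = a :: (b :: u).dropLast :=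
              List.dropLast_cons_of_ne_nil (by simp)
            rw [List.modifyHead_cons, List.dropLast_cons_of_ne_nil (by simp),
                List.cons_append,
                intercalate_cons_prepend c a ((b :: u).dropLast ++ [mask]) (by simp),
                ← List.cons_append, ← hdl, ih, hp]
            simp

-- ===== VERDICT (by name: the statement is the Claim_ definition above) =====
theorem get_mask_file_spec : Claim_equal_get_mask_file := by
  intro fileName _
  show get_mask_file fileName = get_mask_file_alt fileName
  simp only [get_mask_file, get_mask_file_alt, splitOn_eq_mySplit]
  rw [loop_eq_intercalate, key]
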